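-- pv_equiv track=rewrite | github.com/girishshirsat/practice | practiceQ56.py | findLongestArithmeticProgression
-- ===== SOURCE A (Python) =====
-- def findLongestArithmeticProgression(arr, k):
--     if len(arr)==0:
--         return 0
--     elif len(arr)==0:
--         return 1
--     else:
--         arr=sorted(arr)
--         arr=set(arr)
--         MAX=0
--         Cont=0
--         for i in arr:
--             if (i-k) in arr:
--                 continue
--             else:
--                 j=i+k
--                 Cont=1
--                 while j in arr:
--                     Cont+=1
--                     j+=k
--                 if Cont>MAX:
--                     MAX=Cont
--             Cont=0
--         return MAX
-- ===== SOURCE B (Python) =====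
-- def findLongestArithmeticProgression(arr, k):
--     s = set(arr)
--     length = {}
--     for v in sorted(s, reverse=(k < 0)):
--         length[v] = length.get(v - k, 0) + 1
--     return max((length[v] for v in s if v + k not in s), default=0)
-- ===== Notes on version B (the rewrite author's own statement) =====
-- stated objective: simpler
-- what changed: Replaces A's per-chain forward walk (inner while loop restarting at every chain start) by a single DP pass over the sorted set (length[v] = length.get(v-k,0)+1) with the answer taken as the max over chain ends.
import Mathlib
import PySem

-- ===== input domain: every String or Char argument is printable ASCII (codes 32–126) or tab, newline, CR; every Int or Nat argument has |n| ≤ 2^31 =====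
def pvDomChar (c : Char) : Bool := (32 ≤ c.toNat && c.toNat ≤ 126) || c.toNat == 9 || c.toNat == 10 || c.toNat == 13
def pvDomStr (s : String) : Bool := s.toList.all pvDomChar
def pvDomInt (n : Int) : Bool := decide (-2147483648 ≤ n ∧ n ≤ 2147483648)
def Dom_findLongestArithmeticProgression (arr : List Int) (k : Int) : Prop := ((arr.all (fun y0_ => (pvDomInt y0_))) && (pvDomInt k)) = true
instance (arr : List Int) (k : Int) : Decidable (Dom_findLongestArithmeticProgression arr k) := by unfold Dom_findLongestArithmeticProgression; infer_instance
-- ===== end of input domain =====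

-- B replaces A's per-chain forward walk by a single DP pass over the sorted set
-- (length[v] = length.get(v-k,0)+1), taking the max at chain ends; objective: simpler.


-- ===== PORT A =====
-- A's 'while j in arr: Cont += 1; j += k' loop, fuel-bounded; fuel = size of the set
-- suffices (proved below: the visited elements are distinct members of the set).
def pvAWhile (s : List Int) (k : Int) : Nat → Int → Int → Int
  | 0, _, cont => cont
  | fuel+1, j, cont => if j ∈ s then pvAWhile s k fuel (j + k) (cont + 1) else cont

def findLongestArithmeticProgression (arr : List Int) (k : Int) : Int :=
  if arr.length = 0 then 0
  else if arr.length = 0 then 1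
  else
    let s : PySem.Set Int := PySem.Set.ofList (PySem.List.sorted arr (fun x => x) false)
    s.foldl (fun MAX i =>
      if (i - k) ∈ s then MAX
      else
        let cont : Int := pvAWhile s k s.length (i + k) 1
        if cont > MAX then cont else MAX) 0

-- ===== PORT B =====
def findLongestArithmeticProgression_alt (arr : List Int) (k : Int) : Int :=
  let s : PySem.Set Int := PySem.Set.ofList arr
  let d : PySem.Dict Int Int :=
    (PySem.List.sorted s (fun x => x) (decide (k < 0))).foldl
      (fun d v => d.insert v (d.getD (v - k) 0 + 1)) PySem.Dict.empty
  (PySem.List.max? ((s.filter (fun v => !decide ((v + k) ∈ s))).map (fun v => d.getD v 0))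
      (fun x => x)).getD 0

-- ===== PRECONDITION & SPEC =====
def Spec_findLongestArithmeticProgression (arr : List Int) (k : Int) (out : Int) : Prop := out = findLongestArithmeticProgression_alt arr k
instance (arr : List Int) (k : Int) (out : Int) : Decidable (Spec_findLongestArithmeticProgression arr k out) := by unfold Spec_findLongestArithmeticProgression; infer_instance

-- ===== CLAIM (what is proved, stated in full; the proofs are below) =====
def Claim_equal_findLongestArithmeticProgression : Prop := ∀ (arr : List Int) (k : Int), Dom_findLongestArithmeticProgression arr k → Spec_findLongestArithmeticProgression arr k (findLongestArithmeticProgression arr k)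

-- ===== LEMMAS AND PROOFS =====

-- run length of k-steps inside L starting at j: least m with j + m*k ∉ L (0 if none exists)
noncomputable def pvFlen (L : List Int) (k j : Int) : Nat :=
  letI := Classical.dec (∃ m : Nat, j + (m : Int) * k ∉ L)
  if h : ∃ m : Nat, j + (m : Int) * k ∉ L then Nat.find h else 0

lemma pvEscape (L : List Int) (k j : Int) (hk : k ≠ 0) :
    ∃ m : Nat, m ≤ L.length ∧ j + (m : Int) * k ∉ L := by
  by_contra h
  push Not at h
  have hsub : ((List.range (L.length + 1)).map (fun m : Nat => j + (m : Int) * k)) ⊆ L := by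
    intro x hx
    simp only [List.mem_map, List.mem_range] at hx
    obtain ⟨m, hm, rfl⟩ := hx
    exact h m (by omega)
  have hnd : ((List.range (L.length + 1)).map (fun m : Nat => j + (m : Int) * k)).Nodup := by
    refine (List.nodup_range).map ?_
    intro a b hab
    simp only at hab
    have h1 : (a : Int) * k = (b : Int) * k := by omega
    have h2 : (a : Int) = b := mul_right_cancel₀ hk h1
    exact_mod_cast h2
  have := (List.subperm_of_subset hnd hsub).length_le
  simp at this

lemma pvFlen_spec (L : List Int) (k j : Int) (hk : k ≠ 0) :
    j + (pvFlen L k j : Int) * k ∉ L := by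
  obtain ⟨m, _, hm⟩ := pvEscape L k j hk
  have h : ∃ m : Nat, j + (m : Int) * k ∉ L := ⟨m, hm⟩
  simp only [pvFlen]
  rw [dif_pos h]
  exact Nat.find_spec h

lemma pvFlen_min (L : List Int) (k j : Int) (hk : k ≠ 0) {m : Nat}
    (hm : m < pvFlen L k j) : j + (m : Int) * k ∈ L := by
  obtain ⟨m', _, hm'⟩ := pvEscape L k j hk
  have h : ∃ m : Nat, j + (m : Int) * k ∉ L := ⟨m', hm'⟩
  simp only [pvFlen] at hm
  rw [dif_pos h] at hm
  have := Nat.find_min h hm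
  simpa using this

lemma pvFlen_le (L : List Int) (k j : Int) (hk : k ≠ 0) : pvFlen L k j ≤ L.length := by
  obtain ⟨m, hle, hm⟩ := pvEscape L k j hk
  have h : ∃ m : Nat, j + (m : Int) * k ∉ L := ⟨m, hm⟩
  simp only [pvFlen]
  rw [dif_pos h]
  exact le_trans (Nat.find_min' h hm) hle

lemma pvFlen_eq (L : List Int) (k j : Int) {n : Nat}
    (h1 : j + (n : Int) * k ∉ L) (h2 : ∀ m : Nat, m < n → j + (m : Int) * k ∈ L) :
    pvFlen L k j = n := by
  have h : ∃ m : Nat, j + (m : Int) * k ∉ L := ⟨n, h1⟩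
  simp only [pvFlen]
  rw [dif_pos h]
  rw [Nat.find_eq_iff h]
  exact ⟨h1, fun m hm hmem => hmem (h2 m hm)⟩

lemma pvFlen_zero (L : List Int) (k j : Int) (hj : j ∉ L) : pvFlen L k j = 0 :=
  pvFlen_eq L k j (by simpa using hj) (by omega)

lemma pvFlen_succ (L : List Int) (k j : Int) (hk : k ≠ 0) (hj : j ∈ L) :
    pvFlen L k j = pvFlen L k (j + k) + 1 := by
  refine pvFlen_eq L k j ?_ ?_
  · have := pvFlen_spec L k (j + k) hk
    have harith : j + ((pvFlen L k (j + k) + 1 : Nat) : Int) * k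
        = (j + k) + (pvFlen L k (j + k) : Int) * k := by push_cast; ring
    rw [harith]; exact this
  · intro m hm
    cases m with
    | zero => simpa using hj
    | succ m' =>
      have := pvFlen_min L k (j + k) hk (m := m') (by omega)
      have harith : j + ((m' + 1 : Nat) : Int) * k = (j + k) + (m' : Int) * k := by
        push_cast; ring
      rw [harith]; exact this

lemma pvFlen_pos (L : List Int) (k j : Int) (hk : k ≠ 0) (hj : j ∈ L) :
    1 ≤ pvFlen L k j := by
  rw [pvFlen_succ L k j hk hj]; omega

lemma pvFlen_congr (L L' : List Int) (k j : Int) (hk : k ≠ 0)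
    (h : ∀ x : Int, x ∈ L ↔ x ∈ L') : pvFlen L k j = pvFlen L' k j := by
  refine pvFlen_eq L k j ?_ ?_
  · rw [h]; exact pvFlen_spec L' k j hk
  · intro m hm; rw [h]; exact pvFlen_min L' k j hk hm

lemma pvAWhile_eq (L : List Int) (k : Int) (hk : k ≠ 0) :
    ∀ (f : Nat) (j c : Int), pvFlen L k j ≤ f →
      pvAWhile L k f j c = c + (pvFlen L k j : Int) := by
  intro f
  induction f with
  | zero =>
    intro j c hle
    have h0 : pvFlen L k j = 0 := by omega
    by_cases hj : j ∈ L
    · exact absurd h0 (by have := pvFlen_pos L k j hk hj; omega)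
    · simp [pvAWhile, h0]
  | succ f ih =>
    intro j c hle
    by_cases hj : j ∈ L
    · have hs := pvFlen_succ L k j hk hj
      have : pvAWhile L k (f+1) j c = pvAWhile L k f (j + k) (c + 1) := by
        simp [pvAWhile, hj]
      rw [this, ih (j + k) (c + 1) (by omega), hs]
      push_cast; ring
    · rw [pvFlen_zero L k j hj]
      simp [pvAWhile, hj]

-- the end of the chain that starts at i is in L, has no successor, and its backward
-- run length (step -k) equals the forward run length from i
lemma pvChainShift (L : List Int) (k i : Int) (hk : k ≠ 0) (hi : i ∈ L)
    (hpred : i - k ∉ L) :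
    (i + ((pvFlen L k i : Int) - 1) * k ∈ L) ∧
    (i + ((pvFlen L k i : Int) - 1) * k + k ∉ L) ∧
    pvFlen L (-k) (i + ((pvFlen L k i : Int) - 1) * k) = pvFlen L k i := by
  set f := pvFlen L k i with hf
  have hf1 : 1 ≤ f := pvFlen_pos L k i hk hi
  have hmem : i + ((f : Int) - 1) * k ∈ L := by
    have := pvFlen_min L k i hk (m := f - 1) (by omega)
    have harith : ((f - 1 : Nat) : Int) = (f : Int) - 1 := by omega
    rwa [harith] at this
  refine ⟨hmem, ?_, ?_⟩
  · have := pvFlen_spec L k i hk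
    have harith : i + ((f : Int) - 1) * k + k = i + (f : Int) * k := by ring
    rwa [harith]
  · refine pvFlen_eq L (-k) _ ?_ ?_
    · have harith : i + ((f : Int) - 1) * k + (f : Int) * (-k) = i - k := by ring
      rwa [harith]
    · intro m hm
      have := pvFlen_min L k i hk (m := f - 1 - m) (by omega)
      have harith : i + ((f - 1 - m : Nat) : Int) * k
          = i + ((f : Int) - 1) * k + (m : Int) * (-k) := by
        have : ((f - 1 - m : Nat) : Int) = (f : Int) - 1 - m := by omega
        rw [this]; ring
      rwa [harith] at this

-- max-with-default over two lists of positive values with the same members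
lemma pvFoldMaxEq (xs ys : List Int)
    (hx1 : ∀ x ∈ xs, 1 ≤ x) (hy1 : ∀ y ∈ ys, 1 ≤ y)
    (hxy : ∀ x ∈ xs, x ∈ ys) (hyx : ∀ y ∈ ys, y ∈ xs) :
    xs.foldl max 0 = (PySem.List.max? ys (fun x => x)).getD 0 := by
  cases ys with
  | nil =>
    have : xs = [] := by
      cases xs with
      | nil => rfl
      | cons a t => exact absurd (hxy a (by simp)) (by simp)
    simp [this, PySem.List.max?]
  | cons y t =>
    rw [PySem.List.max?_id_cons]
    simp only [Option.getD_some]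
    apply le_antisymm
    · rcases PySem.List.foldl_max_mem xs 0 with h0 | hmem
      · rw [h0]
        have hy := hy1 y (by simp)
        have := (PySem.List.le_foldl_max t y).1
        omega
      · have hx := hxy _ hmem
        rcases List.mem_cons.1 hx with rfl | ht
        · exact (PySem.List.le_foldl_max t _).1
        · exact (PySem.List.le_foldl_max t y).2 _ ht
    · rcases PySem.List.foldl_max_mem t y with h0 | hmem
      · rw [h0]
        exact (PySem.List.le_foldl_max xs 0).2 _ (hyx y (by simp))
      · exact (PySem.List.le_foldl_max xs 0).2 _ (hyx _ (by simp [hmem]))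

-- after B's DP pass over a predecessor-first enumeration of the set, the table holds
-- the backward run length at every member, and 0 elsewhere
lemma pvDictInv (arr : List Int) (k : Int) (hk : k ≠ 0) :
    ∀ (L done : List Int) (d : PySem.Dict Int Int),
      (∀ x : Int, x ∈ done ++ L ↔ x ∈ arr) →
      List.Pairwise (fun a b => (0 < k ∧ a < b) ∨ (k < 0 ∧ b < a)) (done ++ L) →
      (∀ v ∈ done, d.getD v 0 = (pvFlen arr (-k) v : Int)) →
      (∀ v : Int, v ∉ done → d.getD v 0 = 0) →
      ∀ v ∈ done ++ L,
        (L.foldl (fun d v => d.insert v (d.getD (v - k) 0 + 1)) d).getD v 0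
          = (pvFlen arr (-k) v : Int) := by
  intro L
  induction L with
  | nil =>
    intro done d hmem _ hdone _ v hv
    simp only [List.foldl_nil]
    exact hdone v (by simpa using hv)
  | cons w L ih =>
    intro done d hmem hpair hdone hout v hv
    simp only [List.foldl_cons]
    have hwarr : w ∈ arr := (hmem w).1 (by simp)
    have hval : d.getD (w - k) 0 + 1 = (pvFlen arr (-k) w : Int) := by
      by_cases hp : w - k ∈ arr
      · -- the predecessor has already been processed
        have hdonep : w - k ∈ done := by
          have := (hmem (w - k)).2 hp
          rcases List.mem_append.1 this with h | h
          · exact h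
          · rcases List.mem_cons.1 h with heq | hmemL
            · exact absurd heq (by intro h; apply hk; omega)
            · -- w - k after w in the pairwise list: contradiction with direction
              exfalso
              have hrel := (List.pairwise_append.1 hpair).2.1
              rw [List.pairwise_cons] at hrel
              have := hrel.1 _ hmemL
              rcases this with ⟨hk0, hlt⟩ | ⟨hk0, hlt⟩ <;> omega
        rw [hdone _ hdonep]
        have : pvFlen arr (-k) w = pvFlen arr (-k) (w + -k) + 1 :=
          pvFlen_succ arr (-k) w (by omega) hwarr
        rw [show w + -k = w - k by ring] at this
        rw [this]; push_cast; ring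
      · have hnd : w - k ∉ done := fun hc =>
          hp ((hmem (w - k)).1 (List.mem_append.2 (Or.inl hc)))
        rw [hout _ hnd]
        have : pvFlen arr (-k) w = pvFlen arr (-k) (w + -k) + 1 :=
          pvFlen_succ arr (-k) w (by omega) hwarr
        rw [show w + -k = w - k by ring] at this
        rw [this, pvFlen_zero arr (-k) (w - k) hp]
        simp
    have hmem' : ∀ x : Int, x ∈ (done ++ [w]) ++ L ↔ x ∈ arr := by
      intro x; rw [← hmem x]; simp [List.mem_append]
    have hpair' : List.Pairwise (fun a b => (0 < k ∧ a < b) ∨ (k < 0 ∧ b < a))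
        ((done ++ [w]) ++ L) := by
      have : (done ++ [w]) ++ L = done ++ (w :: L) := by simp
      rw [this]; exact hpair
    have hdone' : ∀ v ∈ done ++ [w],
        (d.insert w (d.getD (w - k) 0 + 1)).getD v 0 = (pvFlen arr (-k) v : Int) := by
      intro v hv
      rw [PySem.Dict.getD_insert]
      rcases List.mem_append.1 hv with h | h
      · by_cases hvw : v = w
        · rw [if_pos hvw, hval, hvw]
        · rw [if_neg hvw]; exact hdone v h
      · have : v = w := by simpa using h
        rw [if_pos this, hval, this]
    have hout' : ∀ v : Int, v ∉ done ++ [w] →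
        (d.insert w (d.getD (w - k) 0 + 1)).getD v 0 = 0 := by
      intro v hv
      rw [PySem.Dict.getD_insert, if_neg (by intro h; exact hv (by simp [h]))]
      exact hout v (fun h => hv (by simp [h]))
    have hv' : v ∈ (done ++ [w]) ++ L := by
      rcases List.mem_append.1 hv with h | h
      · exact List.mem_append.2 (Or.inl (List.mem_append.2 (Or.inl h)))
      · rcases List.mem_cons.1 h with rfl | h
        · simp
        · simp [h]
    exact ih (done ++ [w]) _ hmem' hpair' hdone' hout' v hv'

-- A computes the running max of the forward run lengths over the chain starts
lemma pvAChar (arr : List Int) (k : Int) (hk : k ≠ 0) (hne : arr ≠ []) :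
    findLongestArithmeticProgression arr k =
      (((PySem.Set.ofList (PySem.List.sorted arr (fun x => x) false)).filter
          (fun i => decide ((i - k) ∉ PySem.Set.ofList (PySem.List.sorted arr (fun x => x) false)))).map
        (fun i => (pvFlen arr k i : Int))).foldl max 0 := by
  have hlen : ¬ arr.length = 0 := by simpa using hne
  unfold findLongestArithmeticProgression
  rw [if_neg hlen, if_neg hlen]
  set s : PySem.Set Int := PySem.Set.ofList (PySem.List.sorted arr (fun x => x) false) with hs
  have hmemS : ∀ x : Int, x ∈ s ↔ x ∈ arr := by
    intro x
    rw [hs, PySem.Set.mem_ofList, PySem.List.mem_sorted]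
  have hstep : ∀ (MAX : Int), ∀ i ∈ s,
      (if (i - k) ∈ s then MAX
       else
         let cont : Int := pvAWhile s k s.length (i + k) 1
         if cont > MAX then cont else MAX)
      = (if (i - k) ∉ s then max MAX (pvFlen arr k i : Int) else MAX) := by
    intro MAX i hi
    by_cases hp : (i - k) ∈ s
    · simp [hp]
    · have hcont : pvAWhile s k s.length (i + k) 1 = 1 + (pvFlen s k (i + k) : Int) :=
        pvAWhile_eq s k hk s.length (i + k) 1 (pvFlen_le s k (i + k) hk)
      have hsucc : pvFlen s k i = pvFlen s k (i + k) + 1 := pvFlen_succ s k i hk hi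
      have hcg : pvFlen s k i = pvFlen arr k i := pvFlen_congr s arr k i hk hmemS
      simp only [if_neg hp, if_pos hp]
      rw [hcont]
      have hv : 1 + (pvFlen s k (i + k) : Int) = (pvFlen arr k i : Int) := by
        rw [← hcg, hsucc]; push_cast; ring
      rw [hv]
      rcases le_or_gt (pvFlen arr k i : Int) MAX with h | h
      · rw [if_neg (by omega), max_eq_left h]
      · rw [if_pos (by omega), max_eq_right (by omega)]
  rw [PySem.List.foldl_congr_mem _ _ _ _ hstep]
  rw [show (fun (MAX : Int) (i : Int) => if (i - k) ∉ s then max MAX (pvFlen arr k i : Int) else MAX)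
      = (fun (MAX : Int) (i : Int) => if (i - k) ∉ s then (fun M j => max M (pvFlen arr k j : Int)) MAX i else MAX) from rfl]
  rw [PySem.List.foldl_ite_eq_foldl_filter (fun i => (i - k) ∉ s)
      (fun (M : Int) (j : Int) => max M (pvFlen arr k j : Int)) s 0]
  rw [← List.foldl_map]

-- B computes the max (default 0) of the backward run lengths over the chain ends
lemma pvBChar (arr : List Int) (k : Int) (hk : k ≠ 0) :
    findLongestArithmeticProgression_alt arr k =
      (PySem.List.max?
        (((PySem.Set.ofList arr).filter
            (fun v => !decide ((v + k) ∈ PySem.Set.ofList arr))).map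
          (fun v => (pvFlen arr (-k) v : Int))) (fun x => x)).getD 0 := by
  have hBdef : findLongestArithmeticProgression_alt arr k =
      (PySem.List.max?
        (((PySem.Set.ofList arr).filter
            (fun v => !decide ((v + k) ∈ PySem.Set.ofList arr))).map
          (fun v => ((PySem.List.sorted (PySem.Set.ofList arr) (fun x => x) (decide (k < 0))).foldl
              (fun d v => d.insert v (d.getD (v - k) 0 + 1)) PySem.Dict.empty).getD v 0))
        (fun x => x)).getD 0 := rfl
  rw [hBdef]
  set s : PySem.Set Int := PySem.Set.ofList arr with hs
  set L0 : List Int := PySem.List.sorted s (fun x => x) (decide (k < 0)) with hL0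
  have hmemS : ∀ x : Int, x ∈ s ↔ x ∈ arr := fun x => PySem.Set.mem_ofList arr x
  have hmem0 : ∀ x : Int, x ∈ ([] : List Int) ++ L0 ↔ x ∈ arr := by
    intro x
    rw [List.nil_append, hL0, PySem.List.mem_sorted]
    exact hmemS x
  have hpair : List.Pairwise (fun a b => (0 < k ∧ a < b) ∨ (k < 0 ∧ b < a))
      (([] : List Int) ++ L0) := by
    rw [List.nil_append]
    rcases lt_or_gt_of_ne hk with hneg | hpos
    · have hrev : decide (k < 0) = true := decide_eq_true hneg
      rw [hL0, hrev]
      have hle := PySem.List.sorted_pairwise_rev s (fun x : Int => x)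
      have hnd : (PySem.List.sorted s (fun x : Int => x) true).Nodup := by
        have hperm := PySem.List.sorted_perm s (fun x : Int => x) true
        exact hperm.nodup_iff.2 (PySem.Set.nodup_ofList arr)
      exact (hle.and hnd).imp (fun {a b} h => Or.inr ⟨hneg, lt_of_le_of_ne h.1 (Ne.symm h.2)⟩)
    · have hrev : decide (k < 0) = false := decide_eq_false (by omega)
      rw [hL0, hrev, hs]
      have hlt := PySem.List.sorted_ofList_pairwise_lt (κ := Int) arr
      exact hlt.imp (fun {a b} h => Or.inl ⟨hpos, h⟩)
  have hd := pvDictInv arr k hk L0 [] PySem.Dict.empty hmem0 hpair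
      (by intro v hv; simp at hv) (fun v _ => PySem.Dict.getD_empty v 0)
  have hmap : (s.filter (fun v => !decide ((v + k) ∈ s))).map
        (fun v => ((L0.foldl (fun d v => d.insert v (d.getD (v - k) 0 + 1))
          PySem.Dict.empty).getD v 0))
      = (s.filter (fun v => !decide ((v + k) ∈ s))).map
        (fun v => (pvFlen arr (-k) v : Int)) := by
    apply List.map_congr_left
    intro v hv
    have hvs : v ∈ s := (List.mem_filter.1 hv).1
    have hvL : v ∈ ([] : List Int) ++ L0 := (hmem0 v).2 ((hmemS v).1 hvs)
    exact hd v hvL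
  rw [hmap]

-- ===== VERDICT (by name: the statement is the Claim_ definition above) =====
theorem findLongestArithmeticProgression_spec : Claim_equal_findLongestArithmeticProgression := by
  intro arr k _
  unfold Spec_findLongestArithmeticProgression
  by_cases hnil : arr = []
  · subst hnil; rfl
  · by_cases hk : k = 0
    · subst hk
      -- A: every i has i - 0 in the set, so MAX never moves; B: no chain ends, empty max
      have hA : findLongestArithmeticProgression arr 0 = 0 := by
        have hlen : ¬ arr.length = 0 := by simpa using hnil
        unfold findLongestArithmeticProgression
        rw [if_neg hlen, if_neg hlen]
        set s : PySem.Set Int := PySem.Set.ofList (PySem.List.sorted arr (fun x => x) false)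
        have hstep : ∀ (MAX : Int), ∀ i ∈ s,
            (if (i - 0) ∈ s then MAX
             else
               let cont : Int := pvAWhile s 0 s.length (i + 0) 1
               if cont > MAX then cont else MAX)
            = MAX := by
          intro MAX i hi
          rw [if_pos (by simpa using hi)]
        rw [PySem.List.foldl_congr_mem _ _ (fun MAX _ => MAX) _ hstep,
          PySem.List.foldl_ignore]
      have hB : findLongestArithmeticProgression_alt arr 0 = 0 := by
        have hBdef : findLongestArithmeticProgression_alt arr 0 =
            (PySem.List.max?
              (((PySem.Set.ofList arr).filter
                  (fun v => !decide ((v + 0) ∈ PySem.Set.ofList arr))).map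
                (fun v => ((PySem.List.sorted (PySem.Set.ofList arr) (fun x => x) (decide ((0:Int) < 0))).foldl
                    (fun d v => d.insert v (d.getD (v - 0) 0 + 1)) PySem.Dict.empty).getD v 0))
              (fun x => x)).getD 0 := rfl
        rw [hBdef]
        have hfil : (PySem.Set.ofList arr).filter
            (fun v => !decide ((v + 0) ∈ PySem.Set.ofList arr)) = [] := by
          rw [List.filter_eq_nil_iff]
          intro v hv
          simp [hv]
        rw [hfil]
        rfl
      rw [hA, hB]
    · rw [pvAChar arr k hk hnil, pvBChar arr k hk]
      set SA : PySem.Set Int := PySem.Set.ofList (PySem.List.sorted arr (fun x => x) false) with hSA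
      set SB : PySem.Set Int := PySem.Set.ofList arr with hSB
      have hmemA : ∀ x : Int, x ∈ SA ↔ x ∈ arr := by
        intro x
        rw [hSA, PySem.Set.mem_ofList, PySem.List.mem_sorted]
      have hmemB : ∀ x : Int, x ∈ SB ↔ x ∈ arr := fun x => PySem.Set.mem_ofList arr x
      apply pvFoldMaxEq
      · intro x hx
        obtain ⟨i, hi, rfl⟩ := List.mem_map.1 hx
        have hiarr : i ∈ arr := (hmemA i).1 (List.mem_filter.1 hi).1
        have := pvFlen_pos arr k i hk hiarr
        omega
      · intro y hy
        obtain ⟨v, hv, rfl⟩ := List.mem_map.1 hy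
        have hvarr : v ∈ arr := (hmemB v).1 (List.mem_filter.1 hv).1
        have := pvFlen_pos arr (-k) v (by omega) hvarr
        omega
      · intro x hx
        obtain ⟨i, hi, rfl⟩ := List.mem_map.1 hx
        obtain ⟨hiS, hipred⟩ := List.mem_filter.1 hi
        have hiarr : i ∈ arr := (hmemA i).1 hiS
        have hpred : i - k ∉ arr := by
          have := of_decide_eq_true hipred
          rw [hmemA] at this
          exact this
        obtain ⟨h1, h2, h3⟩ := pvChainShift arr k i hk hiarr hpred
        refine List.mem_map.2 ⟨i + ((pvFlen arr k i : Int) - 1) * k, ?_, by rw [h3]⟩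
        refine List.mem_filter.2 ⟨(hmemB _).2 h1, ?_⟩
        simp only [Bool.not_eq_eq_eq_not, Bool.not_true, decide_eq_false_iff_not]
        rw [hmemB]
        exact h2
      · intro y hy
        obtain ⟨v, hv, rfl⟩ := List.mem_map.1 hy
        obtain ⟨hvS, hvpred⟩ := List.mem_filter.1 hv
        have hvarr : v ∈ arr := (hmemB v).1 hvS
        have hsucc : v + k ∉ arr := by
          have h := hvpred
          simp only [Bool.not_eq_true', decide_eq_false_iff_not] at h
          rwa [hmemB] at h
        have hpred' : v - (-k) ∉ arr := by rwa [sub_neg_eq_add]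
        obtain ⟨h1, h2, h3⟩ := pvChainShift arr (-k) v (by omega) hvarr hpred'
        rw [neg_neg] at h3
        refine List.mem_map.2 ⟨v + ((pvFlen arr (-k) v : Int) - 1) * (-k), ?_, by rw [h3]⟩
        refine List.mem_filter.2 ⟨(hmemA _).2 h1, ?_⟩
        rw [decide_eq_true_eq, hmemA]
        rwa [← sub_eq_add_neg] at h2
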